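/-
  Computing `Sem.wpUser` of a decoded instruction by UNFOLDING, with no per-instruction lemma.

  `Sem.wpUser L μ s Q E u` (X86/Derived/User/Wp.lean) is defined clause by clause on the `Sem` term `s`. An instruction
  body is a term built from library procedures (`rmwOp`, `readOpAs`, `effAddr`, `nearJcc` …). This file has what turns
  such a goal into its clauses:

      wpUnfoldU            a simproc: unfold the HEAD constant of the `Sem` term under `wpUser` when it lives in
                           `X86.Insn.*` / `X86.Sem.*` — one definition per visit, nothing below the head, nothing inside a
                           continuation
      Sem.UCont            "then run the rest of the instruction", folded into a constant so that `simp` does not start on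
                           the rest before the head has produced its value and its state (`wpUser_bind_cont`, `UCont_apply`)
      wpUser_ite …         the control constructs (`if`, `bif`, `require` with no fault allowed, `attempt`)

  The stepping tactic (`UserX/Tac.lean`) runs `simp` with these and the clause rules of `wpUser` up to the next node that
  needs a decision: a memory access, an observation of the machine, an undefined-flag procedure, a branch.
-/
import UserX.Basic
import UserX.Attr
import Lean

namespace X86
namespace Sem
open User

variable {α β γ : Type} (L : Layout) (μ : Microarch)

/-! ### Sequencing without descending into the continuation -/

/-- The postcondition "then run `g`": what is left of the instruction, folded. -/
def UCont (L : Layout) (μ : Microarch) (g : α → Sem β) (Q : β → State → Prop) (E : Fault → State → Prop) :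
    α → State → Prop :=
  fun a u' => wpUser L μ (g a) Q E u'

/-- The folded rest of the instruction opens when it has been given its value and its state. -/
@[u_step] theorem UCont_apply (g : α → Sem β) (Q : β → State → Prop) (E : Fault → State → Prop) (a : α) (u : State) :
    UCont L μ g Q E a u = wpUser L μ (g a) Q E u := id rfl

/-- `wpUser` of a sequence: the postcondition of the first part is the rest, folded. -/
@[u_step] theorem wpUser_bind_cont (s : Sem α) (g : α → Sem β) (Q : β → State → Prop) (E : Fault → State → Prop) (u : State) :
    wpUser L μ (s >>= g) Q E u = wpUser L μ s (UCont L μ g Q E) E u :=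
  wpUser_bind' L μ s g Q E u

/-- The same for `Sem.bind` written out. -/
@[u_step] theorem wpUser_bind_cont' (s : Sem α) (g : α → Sem β) (Q : β → State → Prop) (E : Fault → State → Prop) (u : State) :
    wpUser L μ (s.bind g) Q E u = wpUser L μ s (UCont L μ g Q E) E u :=
  wpUser_bind L μ s g Q E u

/-! ### Branches -/

/-- The precondition of a Boolean conditional. -/
@[u_step] theorem wpUser_cond (c : Bool) (s t : Sem α) (Q : α → State → Prop) (E : Fault → State → Prop) (u : State) :
    wpUser L μ (bif c then s else t) Q E u = bif c then wpUser L μ s Q E u else wpUser L μ t Q E u := by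
  cases c <;> rfl

/-- The precondition of an `if` whose arms use the proof of the condition. -/
@[u_step] theorem wpUser_dite (c : Prop) [Decidable c] (s : c → Sem α) (t : ¬ c → Sem α) (Q : α → State → Prop)
    (E : Fault → State → Prop) (u : State) :
    wpUser L μ (if h : c then s h else t h) Q E u = if h : c then wpUser L μ (s h) Q E u else wpUser L μ (t h) Q E u := by
  split <;> rfl

/-! ### `require` -/

/-- A requirement that holds does nothing. -/
@[u_step high] theorem wpUser_require_true (f : Fault) (Q : Unit → State → Prop) (E : Fault → State → Prop) (u : State) :
    wpUser L μ (Sem.require true f) Q E u = Q () u := id rfl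

/-- A requirement that fails raises its fault. -/
@[u_step high] theorem wpUser_require_false (f : Fault) (Q : Unit → State → Prop) (E : Fault → State → Prop) (u : State) :
    wpUser L μ (Sem.require false f) Q E u = E f u := id rfl

/-- When no fault is allowed, a requirement is a proof obligation: the condition, and the rest. -/
@[u_step high] theorem wpUser_require_noFault (c : Bool) (f : Fault) (Q : Unit → State → Prop) (u : State) :
    wpUser L μ (Sem.require c f) Q (fun _ _ => False) u = (c = true ∧ Q () u) := by
  cases c
  · rw [wpUser_require_false]
    exact propext ⟨False.elim, fun h => Bool.noConfusion h.1⟩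
  · rw [wpUser_require_true]
    exact propext ⟨fun h => ⟨rfl, h⟩, fun h => h.2⟩

/-! ### `attempt` (the library's `tryCatch`) and the roll-backs -/

/-- The fault condition "then run the handler `h`", folded. -/
def UHandler (L : Layout) (μ : Microarch) (h : Fault → Sem β) (P : β → State → Prop) (E : Fault → State → Prop) :
    Fault → State → Prop :=
  fun f u' => wpUser L μ (h f) P E u'

/-- The folded handler opens when a fault has reached it. -/
@[u_step] theorem UHandler_apply (h : Fault → Sem β) (P : β → State → Prop) (E : Fault → State → Prop) (f : Fault) (u : State) :
    UHandler L μ h P E f u = wpUser L μ (h f) P E u := id rfl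

/-- `tryCatch body h k` with nothing for `simp` to descend into. -/
@[u_step] theorem wpUser_tryCatch_cont (body : Sem γ) (h : Fault → Sem γ) (k : γ → Sem α) (Q : α → State → Prop)
    (E : Fault → State → Prop) (u : State) :
    wpUser L μ (.tryCatch body h k) Q E u =
      wpUser L μ body (UCont L μ k Q E) (UHandler L μ h (UCont L μ k Q E) E) u := id rfl

/-- `attempt body h`: a fault of the body is judged by the handler's precondition. -/
@[u_step] theorem wpUser_attempt (body : Sem α) (h : Fault → Sem α) (Q : α → State → Prop) (E : Fault → State → Prop) (u : State) :
    wpUser L μ (Sem.attempt body h) Q E u = wpUser L μ body Q (UHandler L μ h Q E) u := id rfl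

/-- `atomically keep body k` with the rest folded; the fault condition is the layer's `rollbackUser`. -/
@[u_step] theorem wpUser_atomically_cont (keep : Machine → Machine → Machine) (body : Sem γ) (k : γ → Sem α)
    (Q : α → State → Prop) (E : Fault → State → Prop) (u : State) :
    wpUser L μ (.atomically keep body k) Q E u = wpUser L μ body (UCont L μ k Q E) (rollbackUser L keep u E) u := id rfl

/-! ### Observations, loads and stores as introduction rules (applied by the stepping loop, not by `simp`) -/

/-- **An observation**: every machine in the relation. The loop introduces `m` and `hm : Abs L m u`, and the NEXT `simp`
call evaluates `f m` with the facts of `hm` before the continuation `k` sees the value. -/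
theorem wpUser_env_intro {f : Machine → β} {k : β → Sem α} {Q : α → State → Prop} {E : Fault → State → Prop} {u : State}
    (h : ∀ m, Abs L m u → wpUser L μ (k (f m)) Q E u) : wpUser L μ (.env f k) Q E u := h

/-- A read of the UNDEFINED-value counter (state the user machine does not track): every machine in the relation. -/
theorem wpUser_read_oracleIdx_intro {k : Nat → Sem α} {Q : α → State → Prop} {E : Fault → State → Prop} {u : State}
    (h : ∀ m, Abs L m u → wpUser L μ (k m.oracleIdx) Q E u) : wpUser L μ (.readReg .oracleIdx k) Q E u := h

/-- **A load**, with the fact that the range lies in the user region handed on to the rest of the instruction (a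
read-modify-write stores where it loaded: the second side condition is then an assumption). -/
theorem wpUser_load_has {q : MemReq} {k : Nat → Sem α} {Q : α → State → Prop} {E : Fault → State → Prop} {u : State}
    (hq : L.Readable q) (hk : L.Has q.off q.n → wpUser L μ (k (u.mem.readLE q.off q.n)) Q E u) :
    wpUser L μ (.readMem q k) Q E u :=
  wpUser_load hq (hk hq.has)

/-- **A store**, with the range fact handed on. -/
theorem wpUser_store_has {q : MemReq} {v : Nat} {k : Sem α} {Q : α → State → Prop} {E : Fault → State → Prop} {u : State}
    (hq : L.Writable q) (hk : L.Has q.off q.n → wpUser L μ k Q E (u.setMem (u.mem.writeLE q.off q.n v))) :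
    wpUser L μ (.writeMem q v k) Q E u :=
  wpUser_store hq (hk hq.has)

end Sem
end X86

/-! ### The unfolding simproc -/

namespace UserX
open Lean Meta Simp

/-- Is `n` a definition `wpUnfoldU` may unfold at the head of a `Sem` term? Everything in the instruction layer and the
library of procedures (`X86.Insn.*`), and the `Sem` vocabulary itself (`X86.Sem.get`, `put`, `load` …) — but no
constructor, no matcher, no recursor. -/
def unfoldableHead (env : Environment) (n : Name) : Bool :=
  let inScope := (`X86.Insn).isPrefixOf n || (`X86.Sem).isPrefixOf n
  let excluded :=
    n == ``X86.Sem.wpUser || n == ``X86.Sem.wp || n == ``X86.Sem.run || n == ``X86.Sem.UCont || n == ``X86.Sem.bind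
  let isDefinition :=
    match env.find? n with
    | some (.defnInfo _) => true
    | _ => false
  inScope && !excluded && isDefinition

/-- Heads `wpUnfoldU` leaves folded: the procedures that draw UNDEFINED flags / values, whose `wpUser` is stated once
in X86/Derived/User/UndefFlags.lean (the stepping loop applies the rule instead of unfolding), and `require`, which has
a rewrite rule of its own. -/
def foldedHeads : List Name :=
  [``X86.Insn.unknownBit, ``X86.Insn.unknownWord, ``X86.Insn.unknownNat, ``X86.Insn.X86.unknownBV, ``X86.Sem.unknownBit,
   ``X86.Sem.commitStatus, ``X86.Alu.Out.commitFlags, ``X86.Alu.MulOut.commitFlags, ``X86.Alu.Out.resolve,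
   ``X86.Alu.DoubleShiftOut.resolve, ``X86.Sem.require, ``X86.Sem.attempt]

/-- `e` with its `i`-th argument replaced. -/
def setArg (e : Expr) (i : Nat) (x : Expr) : Expr :=
  mkAppN e.getAppFn (e.getAppArgs.set! i x)

/-- Evaluate `Operand.width <constructor …>` wherever it occurs in `s`. A body's values have type
`BitVec dst.width.bits`; `Operand.width` is not reducible and `simp` does not rewrite instance arguments, so `~~~a`,
`-a` … would keep `@BitVec.instComplement (Operand.reg .w32 r).width.bits` and no lemma stated at `BitVec 32` could
match. The step is δ / ι: the `rfl` justification of the caller still holds. -/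
def evalOperandWidths (s : Expr) : MetaM Expr := do
  if (s.find? fun e => e.isConstOf ``X86.Operand.width).isNone then
    return s
  Meta.transform s (pre := fun e => do
    if e.isAppOfArity ``X86.Operand.width 1 && (e.getArg! 0).getAppFn.isConst then
      let e' ← withDefault (whnf e)
      if e'.getAppFn.isConst && !e'.isAppOf ``X86.Operand.width then
        return .done e'
      else
        return .continue
    else
      return .continue)

/-- Unfold the head of the `Sem` term under a `wpUser`, once per visit. The step is definitional, but it is justified to
the kernel as `congrArg (fun s => wpUser L μ s Q E u) (rfl : s = s')`: the kernel compares the two `Sem` TERMS (one δ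
step and ι / β at the head), never the two `wpUser`s (PROOF-NOTES.txt section 13). -/
simproc_decl wpUnfoldU (X86.Sem.wpUser _ _ _ _ _ _) := fun e => do
  unless e.isAppOfArity ``X86.Sem.wpUser 7 do
    return .continue
  let s := e.getArg! 3
  let s0 ← whnfCore s
  let fn := s0.getAppFn
  let finish (s' : Expr) : SimpM Step := do
    let s' ← evalOperandWidths s'
    if s' == s then
      return .continue
    let sTy ← inferType s
    let motive ← withLocalDeclD `s sTy fun x => do
      mkLambdaFVars #[x] (setArg e 3 x)
    let h ← mkExpectedTypeHint (← mkEqRefl s') (← mkEq s s')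
    return .visit { expr := setArg e 3 s', proof? := some (← mkCongrArg motive h) }
  let some n := fn.constName? | finish s0
  let env ← getEnv
  if foldedHeads.contains n || !unfoldableHead env n || (← isMatcher n) then
    finish s0
  else
    let some s1 ← withDefault (unfoldDefinition? s0) | finish s0
    finish (← whnfCore s1)

end UserX
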